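-- pv_equiv track=rewrite | github.com/GregoryREvans/evans | evans/general_tools/n_bonacci.py | n_bonacci_cycle
-- ===== SOURCE A (Python) =====
-- def n_bonacci_cycle(n, first_number, second_number, length, modulus, wrap_to_zero=False):
--     sequence = [first_number, second_number]
--     for _ in range(length):
--         sequence.append(sequence[-2] + (sequence[-1] * n))
--     sequence = [(_ % modulus) for _ in sequence]
--     if wrap_to_zero is False:
--         for index, item in enumerate(sequence):
--             if item == 0:
--                 sequence[index] = item + modulus
--     return sequence
-- ===== SOURCE B (Python) =====
-- def n_bonacci_cycle(n, first_number, second_number, length, modulus, wrap_to_zero=False):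
--     # One pass with a running residue pair instead of build-then-mod-then-fix passes.
--     def emit(v):
--         return modulus if (wrap_to_zero is False and v == 0) else v
--     a = first_number % modulus
--     b = second_number % modulus
--     out = [emit(a), emit(b)]
--     for _ in range(length):
--         a, b = b, (a + b * n) % modulus
--         out.append(emit(b))
--     return out
-- ===== Notes on version B (the rewrite author's own statement) =====
-- stated objective: simpler
-- what changed: B replaces A's three passes (build the raw integer sequence by appending and re-reading the last two elements, then a mod-map over the whole list, then an in-place zero-fix loop) with a single loop that carries just a pair of running residues and emits each wrapped value as it goes.
import Mathlib
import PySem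

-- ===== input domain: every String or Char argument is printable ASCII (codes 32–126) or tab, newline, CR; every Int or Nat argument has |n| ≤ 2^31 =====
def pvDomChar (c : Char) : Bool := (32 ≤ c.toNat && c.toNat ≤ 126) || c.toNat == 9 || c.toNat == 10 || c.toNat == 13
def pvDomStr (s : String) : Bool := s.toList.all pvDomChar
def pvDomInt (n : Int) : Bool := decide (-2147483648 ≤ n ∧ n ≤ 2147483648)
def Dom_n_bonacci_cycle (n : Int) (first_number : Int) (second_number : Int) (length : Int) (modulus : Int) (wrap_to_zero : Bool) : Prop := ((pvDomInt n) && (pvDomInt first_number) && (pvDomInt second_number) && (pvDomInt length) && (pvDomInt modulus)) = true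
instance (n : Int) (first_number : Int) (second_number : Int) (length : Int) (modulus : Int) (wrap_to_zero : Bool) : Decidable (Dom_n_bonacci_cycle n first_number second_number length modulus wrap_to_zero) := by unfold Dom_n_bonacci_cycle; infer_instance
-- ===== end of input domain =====

-- ===== PORT A =====
-- B replaces A's three passes by a single loop carrying a running residue pair; return-value equivalence proved on modulus ≠ 0.
-- sequence.append(sequence[-2] + sequence[-1]*n) over range(length); the list always has ≥ 2 elements, so pyGetD's default 0 is never used.
def n_bonacci_cycle (n : Int) (first_number : Int) (second_number : Int) (length : Int) (modulus : Int) (wrap_to_zero : Bool) : List Int :=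
  let sequence : List Int := [first_number, second_number]
  let sequence := (PySem.List.pyRange 0 length 1).foldl
    (fun sequence _ =>
      sequence ++ [PySem.List.pyGetD sequence (-2) 0 + PySem.List.pyGetD sequence (-1) 0 * n])
    sequence
  let sequence := sequence.map (fun x => PySem.Int.mod x modulus)
  if wrap_to_zero = false then
    sequence.map (fun item => if item = 0 then item + modulus else item)
  else
    sequence

-- ===== PORT B =====
def nbcEmit (modulus : Int) (wrap_to_zero : Bool) (v : Int) : Int :=
  if wrap_to_zero = false ∧ v = 0 then modulus else v

def nbcGo (n : Int) (modulus : Int) (wrap_to_zero : Bool) : Nat → Int → Int → List Int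
  | 0, _, _ => []
  | k + 1, a, b =>
    let c := PySem.Int.mod (a + b * n) modulus
    nbcEmit modulus wrap_to_zero c :: nbcGo n modulus wrap_to_zero k b c

def n_bonacci_cycle_alt (n : Int) (first_number : Int) (second_number : Int) (length : Int) (modulus : Int) (wrap_to_zero : Bool) : List Int :=
  let a := PySem.Int.mod first_number modulus
  let b := PySem.Int.mod second_number modulus
  nbcEmit modulus wrap_to_zero a :: nbcEmit modulus wrap_to_zero b ::
    nbcGo n modulus wrap_to_zero length.toNat a b

-- ===== PRECONDITION & SPEC =====
-- Python's '%' raises ZeroDivisionError for modulus = 0; exactly those inputs are excluded.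
def Pre_n_bonacci_cycle (n : Int) (first_number : Int) (second_number : Int) (length : Int) (modulus : Int) (wrap_to_zero : Bool) : Prop :=
  modulus ≠ 0
instance (n : Int) (first_number : Int) (second_number : Int) (length : Int) (modulus : Int) (wrap_to_zero : Bool) : Decidable (Pre_n_bonacci_cycle n first_number second_number length modulus wrap_to_zero) := by unfold Pre_n_bonacci_cycle; infer_instance

def pvWitness_n_bonacci_cycle : Int × Int × Int × Int × Int × Bool := (2, 1, 1, 5, 7, false)

def Spec_n_bonacci_cycle (n : Int) (first_number : Int) (second_number : Int) (length : Int) (modulus : Int) (wrap_to_zero : Bool) (out : List Int) : Prop := out = n_bonacci_cycle_alt n first_number second_number length modulus wrap_to_zero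
instance (n : Int) (first_number : Int) (second_number : Int) (length : Int) (modulus : Int) (wrap_to_zero : Bool) (out : List Int) : Decidable (Spec_n_bonacci_cycle n first_number second_number length modulus wrap_to_zero out) := by unfold Spec_n_bonacci_cycle; infer_instance

-- ===== CLAIM (what is proved, stated in full; the proofs are below) =====
def Claim_equal_n_bonacci_cycle : Prop := ∀ (n : Int) (first_number : Int) (second_number : Int) (length : Int) (modulus : Int) (wrap_to_zero : Bool), Dom_n_bonacci_cycle n first_number second_number length modulus wrap_to_zero → Pre_n_bonacci_cycle n first_number second_number length modulus wrap_to_zero → Spec_n_bonacci_cycle n first_number second_number length modulus wrap_to_zero (n_bonacci_cycle n first_number second_number length modulus wrap_to_zero)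

-- ===== LEMMAS AND PROOFS =====

-- the raw tail A appends: k further terms of the recurrence after a, b
def nbcTail (n : Int) : Nat → Int → Int → List Int
  | 0, _, _ => []
  | k + 1, a, b => (a + b * n) :: nbcTail n k b (a + b * n)

-- a foldl that ignores its elements is an iterate of the step
theorem foldl_ignore {α β : Type} (g : α → α) (l : List β) (s : α) :
    l.foldl (fun acc _ => g acc) s = g^[l.length] s := by
  induction l generalizing s with
  | nil => rfl
  | cons x xs ih => simp [List.foldl_cons, ih, Function.iterate_succ_apply]

theorem nbc_get_neg1 (l : List Int) (a b : Int) :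
    PySem.List.pyGetD (l ++ [a, b]) (-1) 0 = b := by
  have : l ++ [a, b] = (l ++ [a]) ++ [b] := by simp
  rw [this, PySem.List.pyGetD_neg_one_append_singleton]

theorem nbc_get_neg2 (l : List Int) (a b : Int) :
    PySem.List.pyGetD (l ++ [a, b]) (-2) 0 = a := by
  rw [PySem.List.pyGetD_neg_ofNat (l ++ [a, b]) 2 0 (by omega) (by simp)]
  simp

-- A's append loop, iterated k times, grows the list by the recurrence tail
theorem nbc_iterate (n : Int) (k : Nat) :
    ∀ (l : List Int) (a b : Int),
      (fun sequence : List Int =>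
        sequence ++ [PySem.List.pyGetD sequence (-2) 0 + PySem.List.pyGetD sequence (-1) 0 * n])^[k]
        (l ++ [a, b])
      = l ++ a :: b :: nbcTail n k a b := by
  induction k with
  | zero => intro l a b; simp [nbcTail]
  | succ k ih =>
    intro l a b
    rw [Function.iterate_succ_apply]
    simp only [nbc_get_neg1, nbc_get_neg2]
    have h : l ++ [a, b] ++ [a + b * n] = (l ++ [a]) ++ [b, a + b * n] := by simp
    rw [h, ih (l ++ [a]) b (a + b * n)]
    simp [nbcTail]

-- Python-mod congruence: adding a multiple of m does not change fmod
theorem nbc_mod_add_mul (y k m : Int) :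
    PySem.Int.mod (y + k * m) m = PySem.Int.mod y m := by
  have hkm : m ∣ k * m := ⟨k, by ring⟩
  have hd : m ∣ y + k * m ↔ m ∣ y := by
    constructor
    · intro h; have := dvd_sub h hkm; simpa using this
    · intro h; exact dvd_add h hkm
  have he : (y + k * m) % m = y % m := by
    rw [mul_comm]; exact Int.add_mul_emod_self_left y m k
  simp only [PySem.Int.mod, Int.fmod_eq_emod, he, hd]

theorem nbc_mod_congr (x y m : Int) (h : m ∣ x - y) :
    PySem.Int.mod x m = PySem.Int.mod y m := by
  obtain ⟨k, hk⟩ := h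
  have hx : x = y + k * m := by linarith [hk]
  rw [hx, nbc_mod_add_mul]

theorem nbc_mod_sub_self (a m : Int) : m ∣ PySem.Int.mod a m - a := by
  have h := PySem.Int.floordiv_mul_add_mod a m
  exact ⟨-(PySem.Int.floordiv a m), by linarith⟩

-- the residue recurrence computes the mod of the raw recurrence
theorem nbc_mod_step (a b n m : Int) :
    PySem.Int.mod (PySem.Int.mod a m + PySem.Int.mod b m * n) m
      = PySem.Int.mod (a + b * n) m := by
  apply nbc_mod_congr
  have h1 := nbc_mod_sub_self a m
  have h2 : m ∣ (PySem.Int.mod b m - b) * n := Dvd.dvd.mul_right (nbc_mod_sub_self b m) n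
  have : PySem.Int.mod a m + PySem.Int.mod b m * n - (a + b * n)
       = (PySem.Int.mod a m - a) + (PySem.Int.mod b m - b) * n := by ring
  rw [this]
  exact dvd_add h1 h2

-- B's emit is A's zero-fix applied to a residue (and the identity when wrap_to_zero)
theorem nbc_emit_eq (m : Int) (w : Bool) (v : Int) :
    nbcEmit m w v = if w = false then (if v = 0 then v + m else v) else v := by
  cases w <;> by_cases hv : v = 0 <;> simp [nbcEmit, hv]

-- main correspondence: mod-then-wrap of the raw tail is B's residue loop
theorem nbc_tail_go (n m : Int) (w : Bool) (k : Nat) :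
    ∀ (a b : Int),
      (nbcTail n k a b).map
        (fun x => nbcEmit m w (PySem.Int.mod x m))
      = nbcGo n m w k (PySem.Int.mod a m) (PySem.Int.mod b m) := by
  induction k with
  | zero => intro a b; simp [nbcTail, nbcGo]
  | succ k ih =>
    intro a b
    simp only [nbcTail, List.map_cons, nbcGo, nbc_mod_step]
    rw [ih b (a + b * n)]

-- ===== VERDICT (by name: the statement is the Claim_ definition above) =====
theorem n_bonacci_cycle_spec : Claim_equal_n_bonacci_cycle := by
  intro n f s len m w _ _
  unfold Spec_n_bonacci_cycle n_bonacci_cycle n_bonacci_cycle_alt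
  simp only []
  rw [foldl_ignore, PySem.List.length_pyRange_one]
  have hseed : ([f, s] : List Int) = [] ++ [f, s] := by simp
  rw [hseed, nbc_iterate n ((len - 0).toNat) [] f s]
  have hlen : (len - 0).toNat = len.toNat := by omega
  rw [hlen]
  have key : ∀ (xs : List Int),
      (if w = false then
        (xs.map (fun x => PySem.Int.mod x m)).map (fun item => if item = 0 then item + m else item)
      else xs.map (fun x => PySem.Int.mod x m))
      = xs.map (fun x => nbcEmit m w (PySem.Int.mod x m)) := by
    intro xs
    cases w <;> simp [List.map_map, Function.comp, nbc_emit_eq]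
  rw [key]
  simp only [List.nil_append, List.map_cons, nbc_tail_go]
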